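-- pv_equiv track=rewrite | github.com/RBaldassarre/WorldAquatics-API | API_WorldAquatics_CompetitionsID.py | split_years_and_disciplines
-- ===== SOURCE A (Python) =====
-- def split_years_and_disciplines(argv):
--     years_tokens = []
--     disc_tokens = []
--
--     for tok in argv:
--         t = tok.strip()
--         low = t.lower()
--
--         is_year = t.isdigit()
--         is_to = low == "to"
--         is_year_list = "," in t and all(p.strip().isdigit() for p in t.split(","))
--
--         if disc_tokens:
--             disc_tokens.append(t)
--         elif is_year or is_to or is_year_list:
--             years_tokens.append(t)
--         else:
--             disc_tokens.append(t)
--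
--     return years_tokens, disc_tokens
-- ===== SOURCE B (Python) =====
-- def split_years_and_disciplines(argv):
--     def is_yearlike(t):
--         return (t.isdigit()
--                 or t.lower() == "to"
--                 or ("," in t and all(p.strip().isdigit() for p in t.split(","))))
--
--     stripped = [tok.strip() for tok in argv]
--     i = 0
--     while i < len(stripped) and is_yearlike(stripped[i]):
--         i += 1
--     return stripped[:i], stripped[i:]
-- ===== Notes on version B (the rewrite author's own statement) =====
-- stated objective: simpler
-- what changed: Replaces the stateful per-token branch on the accumulating disc list with explicit boundary-finding: strip all tokens, find the first non-year-like token, and slice the list there.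
import Mathlib
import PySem

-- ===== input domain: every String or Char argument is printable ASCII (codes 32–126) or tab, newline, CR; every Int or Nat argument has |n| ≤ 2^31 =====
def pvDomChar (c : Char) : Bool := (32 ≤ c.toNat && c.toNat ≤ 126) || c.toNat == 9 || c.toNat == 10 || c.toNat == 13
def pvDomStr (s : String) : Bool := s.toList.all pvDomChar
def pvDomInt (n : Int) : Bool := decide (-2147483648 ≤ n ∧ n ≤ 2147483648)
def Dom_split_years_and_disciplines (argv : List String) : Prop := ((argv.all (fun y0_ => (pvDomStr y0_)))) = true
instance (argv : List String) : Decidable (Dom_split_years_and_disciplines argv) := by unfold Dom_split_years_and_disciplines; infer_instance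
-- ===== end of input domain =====

-- B replaces A's stateful per-token flag branch by boundary-finding: strip all tokens,
-- locate the first non-year-like one, and slice the stripped list there (objective: simpler).

-- ===== PORT A =====
-- step of A's for-loop over (years_tokens, disc_tokens); t.split(",") is ported with
-- PySem.Chars.splitOn on toList, exact since the separator "," is nonempty.
def pvStepA (acc : List String × List String) (tok : String) : List String × List String :=
  let t := PySem.Str.strip tok
  let low := PySem.Str.lower t
  let is_year := PySem.Str.strIsdigit t
  let is_to := low == "to"
  let is_year_list := PySem.Str.isIn "," t &&
    (PySem.Chars.splitOn t.toList [',']).all (fun q => PySem.Chars.strIsdigit (PySem.Chars.strip q))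
  if acc.2 ≠ [] then (acc.1, acc.2 ++ [t])
  else if is_year || is_to || is_year_list then (acc.1 ++ [t], acc.2)
  else (acc.1, acc.2 ++ [t])

def split_years_and_disciplines (argv : List String) : List String × List String :=
  argv.foldl pvStepA ([], [])

-- ===== PORT B =====
def pvIsYearlike (t : String) : Bool :=
  PySem.Str.strIsdigit t || (PySem.Str.lower t == "to") ||
    (PySem.Str.isIn "," t &&
      (PySem.Chars.splitOn t.toList [',']).all (fun q => PySem.Chars.strIsdigit (PySem.Chars.strip q)))

def split_years_and_disciplines_alt (argv : List String) : List String × List String :=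
  let stripped := argv.map PySem.Str.strip
  let i := stripped.findIdx (fun t => !pvIsYearlike t)
  (stripped.take i, stripped.drop i)

-- ===== PRECONDITION & SPEC =====
def Spec_split_years_and_disciplines (argv : List String) (out : List String × List String) : Prop := out = split_years_and_disciplines_alt argv
instance (argv : List String) (out : List String × List String) : Decidable (Spec_split_years_and_disciplines argv out) := by unfold Spec_split_years_and_disciplines; infer_instance

-- ===== CLAIM (what is proved, stated in full; the proofs are below) =====
def Claim_equal_split_years_and_disciplines : Prop := ∀ (argv : List String), Dom_split_years_and_disciplines argv → Spec_split_years_and_disciplines argv (split_years_and_disciplines argv)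

-- ===== LEMMAS AND PROOFS =====

-- once disc_tokens is nonempty, A only appends every further stripped token to it
theorem pvFoldA_disc_nonempty (argv : List String) (y d : List String) (hd : d ≠ []) :
    argv.foldl pvStepA (y, d) = (y, d ++ argv.map PySem.Str.strip) := by
  induction argv generalizing d with
  | nil => simp
  | cons h t ih =>
    simp only [List.foldl_cons, List.map_cons]
    rw [show pvStepA (y, d) h = (y, d ++ [PySem.Str.strip h]) by simp [pvStepA, hd]]
    rw [ih (d ++ [PySem.Str.strip h]) (by simp)]
    simp

-- while disc_tokens is empty, A's fold is takeWhile/dropWhile of the stripped tokens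
theorem pvFoldA_empty (argv : List String) (y : List String) :
    argv.foldl pvStepA (y, []) =
      (y ++ (argv.map PySem.Str.strip).takeWhile pvIsYearlike,
       (argv.map PySem.Str.strip).dropWhile pvIsYearlike) := by
  induction argv generalizing y with
  | nil => simp
  | cons h t ih =>
    simp only [List.foldl_cons, List.map_cons]
    have hstep : pvStepA (y, []) h =
        if pvIsYearlike (PySem.Str.strip h) then (y ++ [PySem.Str.strip h], [])
        else (y, [PySem.Str.strip h]) := rfl
    by_cases hp : pvIsYearlike (PySem.Str.strip h)
    · rw [hstep, if_pos hp, ih (y ++ [PySem.Str.strip h]),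
        List.takeWhile_cons_of_pos hp, List.dropWhile_cons_of_pos hp]
      simp
    · rw [hstep, if_neg hp, pvFoldA_disc_nonempty t y [PySem.Str.strip h] (by simp),
        List.takeWhile_cons_of_neg hp, List.dropWhile_cons_of_neg hp]
      simp

-- take/drop at the first failure index is takeWhile/dropWhile
theorem pvTakeDrop_findIdx (p : String → Bool) (l : List String) :
    (l.take (l.findIdx fun t => !p t), l.drop (l.findIdx fun t => !p t)) =
      (l.takeWhile p, l.dropWhile p) := by
  induction l with
  | nil => rfl
  | cons h t ih =>
    by_cases hp : p h
    · simp [List.findIdx_cons, hp]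
      exact ⟨congrArg Prod.fst ih, congrArg Prod.snd ih⟩
    · simp [List.findIdx_cons, hp]

-- ===== VERDICT (by name: the statement is the Claim_ definition above) =====
theorem split_years_and_disciplines_spec : Claim_equal_split_years_and_disciplines := by
  intro argv _
  unfold Spec_split_years_and_disciplines split_years_and_disciplines split_years_and_disciplines_alt
  rw [pvFoldA_empty argv []]
  rw [pvTakeDrop_findIdx pvIsYearlike (argv.map PySem.Str.strip)]
  simp
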